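-- pv_equiv track=rewrite | github.com/fesuard/Hackerrank | easy/AcmIcpcTeam.py | acmTeam
-- ===== SOURCE A (Python) =====
-- def acmTeam(topic):
--     n = len(topic)
--     team_topics = []
--
--     for i in range(n-1):
--         for j in range(i+1, n):
--             topics = 0
--             for a, b in zip(topic[i], topic[j]):
--                 if a == '1' or b == '1':
--                     topics += 1
--             team_topics.append(topics)
--
--     return [max(team_topics), team_topics.count(max(team_topics))]
-- ===== SOURCE B (Python) =====
-- def acmTeam(topic):
--     # Bitmask per person (bit p = 1 iff topic[i][p] == '1'), then a single
--     # running best/tally pass over pairs using popcount of the or-ed masks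
--     # truncated to the shorter row (zip truncates in the original).
--     masks = []
--     for t in topic:
--         m = 0
--         for c in reversed(t):
--             m = 2 * m + (1 if c == '1' else 0)
--         masks.append((m, len(t)))
--     best, tally = -1, 0
--     rest = masks
--     while rest:
--         (mi, li) = rest[0]
--         rest = rest[1:]
--         for (mj, lj) in rest:
--             cnt = ((mi | mj) & ((1 << min(li, lj)) - 1)).bit_count()
--             if cnt > best:
--                 best, tally = cnt, 1
--             elif cnt == best:
--                 tally += 1
--     return [best, tally]
-- ===== Notes on version B (the rewrite author's own statement) =====
-- stated objective: alternative
-- what changed: Each row is precomputed once as an integer bitmask; each pair's shared-topic count becomes a popcount of the or-ed masks (truncated to the shorter row), and the per-pair list plus the two max/count passes are replaced by a running best/tally maintained in one pass over the pairs.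
-- outside the precondition, e.g. on acmTeam(['1']): A raises ValueError, B returns [-1, 0]; on acmTeam([]): A raises ValueError, B returns [-1, 0]
import Mathlib
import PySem

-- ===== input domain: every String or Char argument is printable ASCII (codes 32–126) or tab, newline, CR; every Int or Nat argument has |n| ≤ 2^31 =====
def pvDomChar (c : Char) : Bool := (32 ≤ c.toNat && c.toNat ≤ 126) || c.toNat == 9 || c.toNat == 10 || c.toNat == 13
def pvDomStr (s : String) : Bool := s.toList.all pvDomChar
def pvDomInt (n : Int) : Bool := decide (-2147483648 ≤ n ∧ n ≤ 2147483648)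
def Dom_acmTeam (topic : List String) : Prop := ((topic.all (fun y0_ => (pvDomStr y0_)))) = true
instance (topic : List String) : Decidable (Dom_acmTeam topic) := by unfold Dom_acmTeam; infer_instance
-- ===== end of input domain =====

-- B replaces the per-pair character zip and the pair list (with its two extra
-- max/count passes) by per-row integer bitmasks, a popcount per pair and a
-- running best/tally maintained in a single pass; equal return value proved
-- for len(topic) >= 2 (below that A's max([]) raises ValueError).

-- ===== PORT A =====
-- inner loop "for a, b in zip(topic[i], topic[j]): if a == '1' or b == '1': topics += 1"
def pvCntA (s t : String) : Int :=
  (s.toList.zip t.toList).foldl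
    (fun topics p => if p.1 = '1' ∨ p.2 = '1' then topics + 1 else topics) 0

def acmTeam (topic : List String) : List Int :=
  let n : Int := (topic.length : Int)
  let team_topics : List Int :=
    (PySem.List.pyRange 0 (n - 1) 1).foldl (fun acc i =>
      (PySem.List.pyRange (i + 1) n 1).foldl (fun acc2 j =>
        acc2 ++ [pvCntA (PySem.List.pyGetD topic i "") (PySem.List.pyGetD topic j "")]) acc) []
  match PySem.List.max? team_topics (fun x => x) with
  | some m => [m, (team_topics.count m : Int)]
  | none => []   -- Python: max([]) raises ValueError; excluded by Pre_acmTeam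

-- ===== PORT B =====
-- "for c in reversed(t): m = 2*m + (1 if c == '1' else 0)"
def pvMask (t : String) : Int :=
  t.toList.reverse.foldl (fun m c => 2 * m + (if c = '1' then 1 else 0)) 0

-- one "if cnt > best: ... elif cnt == best: ..." update of (best, tally)
def pvStep (st : Int × Int) (cnt : Int) : Int × Int :=
  if cnt > st.1 then (cnt, 1) else if cnt = st.1 then (st.1, st.2 + 1) else st

-- "((mi | mj) & ((1 << min(li, lj)) - 1)).bit_count()"; row lengths are kept as
-- Nat (they are the nonnegative Python ints len(t)) so "<<" shifts by a Nat
def pvCntB (p q : Int × Nat) : Int :=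
  (PySem.Int.bitCount (PySem.Int.band (PySem.Int.bor p.1 q.1)
    (((1 : Int) <<< (min p.2 q.2)) - 1)) : Int)

-- the "while rest:" loop: peel the head, fold the inner "for" over the tail
def pvPairLoop : List (Int × Nat) → Int × Int → Int × Int
  | [], st => st
  | p :: rest, st => pvPairLoop rest (rest.foldl (fun st' q => pvStep st' (pvCntB p q)) st)

def acmTeam_alt (topic : List String) : List Int :=
  let masks : List (Int × Nat) := topic.map (fun t => (pvMask t, t.toList.length))
  let res := pvPairLoop masks (-1, 0)
  [res.1, res.2]

-- ===== PRECONDITION & SPEC =====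
-- Pre_ excludes lists with fewer than two rows: there A's max([]) raises ValueError.
def Pre_acmTeam (topic : List String) : Prop := 2 ≤ topic.length
instance (topic : List String) : Decidable (Pre_acmTeam topic) := by unfold Pre_acmTeam; infer_instance
def pvWitness_acmTeam : List String := (["10101", "11100", "11010"])

def Spec_acmTeam (topic : List String) (out : List Int) : Prop := out = acmTeam_alt topic
instance (topic : List String) (out : List Int) : Decidable (Spec_acmTeam topic out) := by unfold Spec_acmTeam; infer_instance

-- ===== CLAIM (what is proved, stated in full; the proofs are below) =====
def Claim_equal_acmTeam : Prop := ∀ (topic : List String), Dom_acmTeam topic → Pre_acmTeam topic → Spec_acmTeam topic (acmTeam topic)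

-- ===== LEMMAS AND PROOFS =====

-- canonical list of per-pair values, head against tail, then recurse
def pvPairs {α : Type} (f : α → α → Int) : List α → List Int
  | [] => []
  | x :: rest => rest.map (f x) ++ pvPairs f rest

-- Nat-level mask of a row (proof-side mirror of pvMask)
def pvMaskN : List Char → Nat
  | [] => 0
  | c :: t => Nat.bit (c = '1') (pvMaskN t)

-- Nat-level value of the zip count (proof-side mirror of pvCntA)
def pvCountOrN (a b : List Char) : Nat :=
  (a.zip b).countP (fun p => decide (p.1 = '1' ∨ p.2 = '1'))

lemma pvMask_list (l : List Char) :
    l.reverse.foldl (fun m c => 2 * m + (if c = '1' then 1 else 0)) 0 = (pvMaskN l : Int) := by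
  induction l with
  | nil => simp [pvMaskN]
  | cons c l ih =>
    simp only [List.reverse_cons, List.foldl_append, List.foldl_cons, List.foldl_nil, ih,
      pvMaskN, Nat.bit_val]
    by_cases h : c = '1' <;> simp [h]

lemma pvMask_eq (t : String) : pvMask t = (pvMaskN t.toList : Int) := pvMask_list _

lemma pvBitCount_bit (b : Bool) (n : Nat) :
    PySem.Int.bitCount ((Nat.bit b n : Nat) : Int) = b.toNat + PySem.Int.bitCount (n : Int) := by
  cases b with
  | false =>
    simp only [Nat.bit_val, Bool.toNat_false, Nat.add_zero]
    rcases Nat.eq_zero_or_pos n with h | h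
    · simp [h]
    · rw [PySem.Int.bitCount_natCast (by omega : 0 < 2 * n)]
      rw [show 2 * n % 2 = 0 from by omega, show 2 * n / 2 = n from by omega]
  | true =>
    simp only [Nat.bit_val, Bool.toNat_true]
    rw [PySem.Int.bitCount_natCast (by omega : 0 < 2 * n + 1)]
    rw [show (2 * n + 1) % 2 = 1 from by omega, show (2 * n + 1) / 2 = n from by omega]

lemma pvKey (a : List Char) : ∀ b : List Char,
    PySem.Int.bitCount (((pvMaskN a ||| pvMaskN b) &&& (2 ^ (min a.length b.length) - 1) : Nat) : Int)
      = pvCountOrN a b := by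
  induction a with
  | nil =>
    intro b
    simp [pvMaskN, pvCountOrN, PySem.Int.bitCount_zero]
  | cons c a ih =>
    intro b
    cases b with
    | nil => simp [pvCountOrN, PySem.Int.bitCount_zero]
    | cons d b =>
      simp only [pvMaskN, List.length_cons]
      rw [show min (a.length + 1) (b.length + 1) = min a.length b.length + 1 from by omega]
      rw [Nat.lor_bit]
      rw [show 2 ^ (min a.length b.length + 1) - 1
            = Nat.bit true (2 ^ (min a.length b.length) - 1) from by
        have := Nat.one_le_two_pow (n := min a.length b.length)
        simp only [Nat.bit_val, Bool.toNat_true]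
        rw [pow_succ]; omega]
      rw [Nat.land_bit]
      rw [pvBitCount_bit, ih b]
      simp only [pvCountOrN, List.zip_cons_cons, List.countP_cons]
      by_cases hc : c = '1' <;> by_cases hd : d = '1' <;> simp [hc, hd] <;> omega

lemma pvPairLoop_eq (ms : List (Int × Nat)) : ∀ (st : Int × Int),
    pvPairLoop ms st = (pvPairs pvCntB ms).foldl pvStep st := by
  induction ms with
  | nil => intro st; rfl
  | cons p rest ih =>
    intro st
    simp only [pvPairLoop, pvPairs, List.foldl_append, List.foldl_map, ih]

lemma pvPairs_map {α β : Type} (h : α → β) (f : β → β → Int) (l : List α) :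
    pvPairs f (l.map h) = pvPairs (fun x y => f (h x) (h y)) l := by
  induction l with
  | nil => rfl
  | cons x l ih => simp [pvPairs, ih, List.map_map]

lemma pvCntA_nonneg (s t : String) : 0 ≤ pvCntA s t := by
  have := PySem.List.foldl_if_add_one
    (fun p : Char × Char => decide (p.1 = '1' ∨ p.2 = '1')) (s.toList.zip t.toList) 0
  simp only [pvCntA]
  rw [show (fun (topics : Int) (p : Char × Char) => if p.1 = '1' ∨ p.2 = '1' then topics + 1 else topics)
      = (fun acc p => if (fun p : Char × Char => decide (p.1 = '1' ∨ p.2 = '1')) p = true then acc + 1 else acc)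
    from by funext a p; simp]
  rw [this]; positivity

-- ===== pvTeam_eq =====
lemma pvTeam_nat (g : String → String → Int) : ∀ (ls : List String),
    (List.range (ls.length - 1)).flatMap
      (fun k => ((ls.drop (k+1)).map (fun s => g (ls.getD k "") s))) = pvPairs g ls := by
  intro ls
  induction ls with
  | nil => rfl
  | cons s rest ih =>
    cases rest with
    | nil => rfl
    | cons t rest' =>
      simp only [List.length_cons, Nat.add_sub_cancel]
      rw [List.range_succ_eq_map]
      simp only [List.flatMap_cons, List.flatMap_map]
      have hf : (fun a => ((s :: t :: rest').drop (Nat.succ a + 1)).map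
            (fun s_1 => g ((s :: t :: rest').getD (Nat.succ a) "") s_1))
          = (fun a => ((t :: rest').drop (a + 1)).map
            (fun s_1 => g ((t :: rest').getD a "") s_1)) := by
        funext a; rfl
      rw [hf]
      have ih' := ih
      simp only [List.length_cons, Nat.add_sub_cancel] at ih'
      rw [ih']
      rfl

lemma pvTeam_eq (topic : List String) :
    (PySem.List.pyRange 0 ((topic.length : Int) - 1) 1).foldl (fun acc i =>
      (PySem.List.pyRange (i + 1) (topic.length : Int) 1).foldl (fun acc2 j =>
        acc2 ++ [pvCntA (PySem.List.pyGetD topic i "") (PySem.List.pyGetD topic j "")]) acc) []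
      = pvPairs pvCntA topic := by
  have hinner : ∀ i : Int, 0 ≤ i →
      (PySem.List.pyRange (i + 1) (topic.length : Int) 1).map
        (fun j => pvCntA (PySem.List.pyGetD topic i "") (PySem.List.pyGetD topic j ""))
      = (topic.drop (i.toNat + 1)).map (fun s => pvCntA (PySem.List.pyGetD topic i "") s) := by
    intro i hi
    rw [show (fun j => pvCntA (PySem.List.pyGetD topic i "") (PySem.List.pyGetD topic j ""))
        = (fun s => pvCntA (PySem.List.pyGetD topic i "") s) ∘ (fun j => PySem.List.pyGetD topic j "")
      from rfl]
    rw [← List.map_map, PySem.List.map_pyGetD_pyRange' topic "" (by omega : (0:Int) ≤ i + 1)]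
    rw [show (i + 1).toNat = i.toNat + 1 from by omega]
  calc _ = [] ++ (PySem.List.pyRange 0 ((topic.length : Int) - 1) 1).flatMap (fun i =>
        (PySem.List.pyRange (i + 1) (topic.length : Int) 1).map
          (fun j => pvCntA (PySem.List.pyGetD topic i "") (PySem.List.pyGetD topic j ""))) := by
        rw [← PySem.List.foldl_append_eq_flatMap]
        congr 1
        funext acc i
        exact PySem.List.foldl_append_singleton_eq_map _ _ _
    _ = pvPairs pvCntA topic := by
        rw [List.nil_append, PySem.List.pyRange_one, List.flatMap_map]
        rw [show ((topic.length : Int) - 1 - 0).toNat = topic.length - 1 from by omega]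
        rw [← pvTeam_nat pvCntA topic]
        apply List.flatMap_congr
        intro x hx
        rw [show (0 : Int) + (x : Int) = (x : Int) from by ring]
        rw [hinner (x : Int) (by positivity)]
        rw [PySem.List.pyGetD_natCast, Int.toNat_natCast]

lemma pvLe_foldl_max (L : List Int) : ∀ b : Int, b ≤ L.foldl max b := by
  induction L with
  | nil => simp
  | cons c L ih => intro b; exact le_trans (le_max_left b c) (ih _)

lemma pvFold_char (L : List Int) : ∀ b t : Int,
    L.foldl pvStep (b, t) =
      (L.foldl max b,
       if L.foldl max b = b then t + (L.count b : Int) else (L.count (L.foldl max b) : Int)) := by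
  induction L with
  | nil => intro b t; simp
  | cons c L ih =>
    intro b t
    simp only [List.foldl_cons, List.count_cons]
    rcases lt_trichotomy b c with h | h | h
    · rw [show pvStep (b,t) c = (c,1) from by simp [pvStep, h], ih,
        show max b c = c from max_eq_right h.le]
      have hm : c ≤ L.foldl max c := pvLe_foldl_max L c
      have hbm : L.foldl max c ≠ b := by omega
      simp only [hbm, if_false]
      by_cases hcm : L.foldl max c = c
      · simp [hcm]; omega
      · have : (c == L.foldl max c) = false := by
          simp [Ne.symm hcm]
        simp [this, hcm]
    · subst h
      rw [show pvStep (b,t) b = (b, t+1) from by simp [pvStep], ih, max_self]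
      by_cases hm : L.foldl max b = b
      · simp [hm]; omega
      · have : (b == L.foldl max b) = false := by simp [Ne.symm hm]
        simp [hm, this]
    · rw [show pvStep (b,t) c = (b, t) from by
        have h1 : ¬ b < c := by omega
        have h2 : ¬ c = b := by omega
        simp [pvStep, h1, h2], ih,
        show max b c = b from max_eq_left h.le]
      have hm : b ≤ L.foldl max b := pvLe_foldl_max L b
      have hcb : (c == b) = false := by simp; omega
      by_cases hmb : L.foldl max b = b
      · simp [hmb, hcb]
      · have : (c == L.foldl max b) = false := by simp; omega
        simp [hmb, this]

-- pvCntA as a cast Nat count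
lemma pvCntA_eq_countOrN (s t : String) : pvCntA s t = (pvCountOrN s.toList t.toList : Int) := by
  simp only [pvCntA, pvCountOrN]
  rw [show (fun (topics : Int) (p : Char × Char) => if p.1 = '1' ∨ p.2 = '1' then topics + 1 else topics)
      = (fun acc p => if (fun p : Char × Char => decide (p.1 = '1' ∨ p.2 = '1')) p = true then acc + 1 else acc)
    from by funext a p; simp]
  rw [PySem.List.foldl_if_add_one]
  simp

-- the per-pair key fact: popcount of the truncated or-ed masks = the zip count
lemma pvCnt_key (s t : String) :
    pvCntB (pvMask s, s.toList.length) (pvMask t, t.toList.length) = pvCntA s t := by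
  have h1 : (1 : Nat) ≤ 2 ^ (min s.toList.length t.toList.length) := Nat.one_le_two_pow
  simp only [pvCntB, pvMask_eq, PySem.Int.bor_natCast]
  rw [show ((1 : Int) <<< (min s.toList.length t.toList.length))
      = ((2 ^ (min s.toList.length t.toList.length) : Nat) : Int) from by
    rw [Int.shiftLeft_eq]; push_cast; ring]
  rw [show (((2 ^ (min s.toList.length t.toList.length) : Nat) : Int) - 1)
      = (((2 ^ (min s.toList.length t.toList.length) - 1 : Nat) : Int)) from by
    rw [Nat.cast_sub h1]; simp]
  rw [PySem.Int.band_natCast, pvKey s.toList t.toList, pvCntA_eq_countOrN]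

-- ===== VERDICT (by name: the statement is the Claim_ definition above) =====
theorem acmTeam_spec : Claim_equal_acmTeam := by
  intro topic _ hpre
  unfold Spec_acmTeam
  -- B's side: pair loop over masks = fold of pvStep over pvPairs pvCntA
  have hB : acmTeam_alt topic = [((pvPairs pvCntA topic).foldl pvStep (-1, 0)).1,
      ((pvPairs pvCntA topic).foldl pvStep (-1, 0)).2] := by
    simp only [acmTeam_alt, pvPairLoop_eq, pvPairs_map]
    rw [show (fun (x y : String) => pvCntB (pvMask x, x.toList.length) (pvMask y, y.toList.length))
        = pvCntA from by funext x y; exact pvCnt_key x y]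
  -- A's side: team list = pvPairs pvCntA topic
  have hA : acmTeam topic =
      match PySem.List.max? (pvPairs pvCntA topic) (fun x => x) with
      | some m => [m, ((pvPairs pvCntA topic).count m : Int)]
      | none => [] := by
    simp only [acmTeam]
    rw [pvTeam_eq topic]
  rw [hA, hB]
  -- topic has at least two rows, so the pair list is nonempty
  obtain ⟨s, t, rest, rfl⟩ : ∃ s t rest, topic = s :: t :: rest := by
    match topic, hpre with
    | s :: t :: rest, _ => exact ⟨s, t, rest, rfl⟩
  have hL : pvPairs pvCntA (s :: t :: rest)
      = pvCntA s t :: ((t :: rest).tail.map (pvCntA s) ++ pvPairs pvCntA (t :: rest)) := by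
    simp [pvPairs]
  set L := pvPairs pvCntA (s :: t :: rest) with hLdef
  rw [hL]
  set tl := ((t :: rest).tail.map (pvCntA s) ++ pvPairs pvCntA (t :: rest)) with htl
  have hc0 : (0 : Int) ≤ pvCntA s t := pvCntA_nonneg s t
  rw [PySem.List.max?_id_cons]
  rw [List.foldl_cons, show pvStep (-1, 0) (pvCntA s t) = (pvCntA s t, 1) from by
    simp [pvStep]; omega]
  rw [pvFold_char]
  set M := tl.foldl max (pvCntA s t) with hM
  have hcM : pvCntA s t ≤ M := pvLe_foldl_max tl (pvCntA s t)
  by_cases hEq : M = pvCntA s t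
  · simp only [hEq, List.count_cons, beq_self_eq_true, if_pos]
    simp [add_comm]
  · have : (pvCntA s t == M) = false := by simp; omega
    simp only [if_neg hEq, List.count_cons, this]
    simp
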